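-- pv_equiv track=rewrite | github.com/cua-verse/agenthle-base | tasks/hardware/Embedded_UART/eval.py | check_system_clock
-- ===== SOURCE A (Python) =====
-- def check_system_clock(ioc_text):
--     """Check that system clock is configured to 180MHz.
--
--     Checks .ioc for RCC.SYSCLKFreq_VALUE=180000000 and
--     RCC.APB1TimFreq_Value=90000000.
--
--     Returns dict with:
--         'sysclk_180mhz': bool
--         'apb1_tim_90mhz': bool
--         'all_pass': bool
--     """
--     results = {
--         "sysclk_180mhz": False,
--         "apb1_tim_90mhz": False,
--         "all_pass": False,
--     }
--
--     for line in ioc_text.split('\n'):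
--         line = line.strip()
--         if line == "RCC.SYSCLKFreq_VALUE=180000000":
--             results["sysclk_180mhz"] = True
--         elif line == "RCC.APB1TimFreq_Value=90000000":
--             results["apb1_tim_90mhz"] = True
--
--     results["all_pass"] = results["sysclk_180mhz"] and results["apb1_tim_90mhz"]
--
--     return results
-- ===== SOURCE B (Python) =====
-- def check_system_clock(ioc_text):
--     """Parse the .ioc into a key -> list-of-values table once, then answer each
--     check by looking up the config key and testing its recorded values."""
--     cfg = {}
--     for raw in ioc_text.split('\n'):
--         line = raw.strip()
--         i = line.find('=')
--         if i != -1: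
--             key = line[:i]
--             value = line[i + 1:]
--             cfg[key] = cfg.get(key, []) + [value]
--     sysclk = "180000000" in cfg.get("RCC.SYSCLKFreq_VALUE", [])
--     apb1 = "90000000" in cfg.get("RCC.APB1TimFreq_Value", [])
--     return {
--         "sysclk_180mhz": sysclk,
--         "apb1_tim_90mhz": apb1,
--         "all_pass": sysclk and apb1,
--     }
-- ===== Notes on version B (the rewrite author's own statement) =====
-- stated objective: alternative
-- what changed: Instead of scanning lines and comparing each whole stripped line against the two full-line literals with if/elif flag updates, B parses the file once into a key -> list-of-values configuration table (splitting each line at its first '=') and answers each check by looking up the config key and testing its values.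
import Mathlib
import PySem

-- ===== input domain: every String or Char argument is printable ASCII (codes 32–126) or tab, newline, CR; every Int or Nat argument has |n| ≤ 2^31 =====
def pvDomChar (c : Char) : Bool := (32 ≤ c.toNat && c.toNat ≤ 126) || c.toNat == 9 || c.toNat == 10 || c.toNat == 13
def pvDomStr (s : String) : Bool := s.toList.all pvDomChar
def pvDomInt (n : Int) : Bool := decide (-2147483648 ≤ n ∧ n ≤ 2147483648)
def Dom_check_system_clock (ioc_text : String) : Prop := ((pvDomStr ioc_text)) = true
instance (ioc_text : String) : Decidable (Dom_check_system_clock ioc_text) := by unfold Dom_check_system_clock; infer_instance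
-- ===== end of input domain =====

-- B parses the .ioc into a key → list-of-values table once and answers each check by key lookup (alternative to A's whole-line flag scan).
-- ===== PORT A =====
def check_system_clock (ioc_text : String) : List (String × Bool) :=
  let results : PySem.Dict String Bool :=
    PySem.Dict.ofList [("sysclk_180mhz", false), ("apb1_tim_90mhz", false), ("all_pass", false)]
  -- s.split('\n'): sep is the nonempty literal "\n", so split? is always `some`; getD [] is its total form
  let results := ((PySem.Str.split? ioc_text "\n").getD []).foldl (fun r line =>
    let line := PySem.Str.strip line
    if line = "RCC.SYSCLKFreq_VALUE=180000000" then r.insert "sysclk_180mhz" true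
    else if line = "RCC.APB1TimFreq_Value=90000000" then r.insert "apb1_tim_90mhz" true
    else r) results
  -- results["k"] is a plain lookup whose key is always present; getD is exact here
  let results := results.insert "all_pass"
    (results.getD "sysclk_180mhz" false && results.getD "apb1_tim_90mhz" false)
  results.items

-- ===== PORT B =====
def check_system_clock_alt (ioc_text : String) : List (String × Bool) :=
  let cfg : PySem.Dict String (List String) :=
    ((PySem.Str.split? ioc_text "\n").getD []).foldl (fun cfg raw =>
      let line := PySem.Str.strip raw
      let i := PySem.Str.find line "="
      if i ≠ -1 then
        -- cfg[key] = cfg.get(key, []) + [value]  with key = line[:i], value = line[i+1:]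
        cfg.modify (PySem.Str.slice line none (some i)) []
          (· ++ [PySem.Str.slice line (some (i + 1)) none])
      else cfg) PySem.Dict.empty
  let sysclk := (cfg.getD "RCC.SYSCLKFreq_VALUE" []).contains "180000000"
  let apb1 := (cfg.getD "RCC.APB1TimFreq_Value" []).contains "90000000"
  [("sysclk_180mhz", sysclk), ("apb1_tim_90mhz", apb1), ("all_pass", sysclk && apb1)]

-- ===== PRECONDITION & SPEC =====
def Spec_check_system_clock (ioc_text : String) (out : List (String × Bool)) : Prop := out = check_system_clock_alt ioc_text
instance (ioc_text : String) (out : List (String × Bool)) : Decidable (Spec_check_system_clock ioc_text out) := by unfold Spec_check_system_clock; infer_instance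

-- ===== CLAIM (what is proved, stated in full; the proofs are below) =====
def Claim_equal_check_system_clock : Prop := ∀ (ioc_text : String), Dom_check_system_clock ioc_text → Spec_check_system_clock ioc_text (check_system_clock ioc_text)

-- ===== LEMMAS AND PROOFS =====

-- A's flag-updating loop, characterised: the dict after the scan carries "did some stripped line equal the target".
theorem loop_flags (ls : List String) (b1 b2 : Bool) :
    (ls.foldl (fun r line =>
        let line := PySem.Str.strip line
        if line = "RCC.SYSCLKFreq_VALUE=180000000" then r.insert "sysclk_180mhz" true
        else if line = "RCC.APB1TimFreq_Value=90000000" then r.insert "apb1_tim_90mhz" true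
        else r)
      (PySem.Dict.mk [("sysclk_180mhz", b1), ("apb1_tim_90mhz", b2), ("all_pass", false)]))
    = PySem.Dict.mk
        [("sysclk_180mhz", b1 || ls.any (fun l => PySem.Str.strip l == "RCC.SYSCLKFreq_VALUE=180000000")),
         ("apb1_tim_90mhz", b2 || ls.any (fun l => PySem.Str.strip l == "RCC.APB1TimFreq_Value=90000000")),
         ("all_pass", false)] := by
  induction ls generalizing b1 b2 with
  | nil => simp
  | cons h t ih =>
    by_cases h1 : PySem.Str.strip h = "RCC.SYSCLKFreq_VALUE=180000000"
    · simp only [List.foldl_cons, if_pos h1]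
      rw [show ((PySem.Dict.mk [("sysclk_180mhz", b1), ("apb1_tim_90mhz", b2), ("all_pass", false)]).insert "sysclk_180mhz" true)
            = PySem.Dict.mk [("sysclk_180mhz", true), ("apb1_tim_90mhz", b2), ("all_pass", false)] by
            simp [PySem.Dict.insert]]
      rw [ih]
      simp [h1]
    · by_cases h2 : PySem.Str.strip h = "RCC.APB1TimFreq_Value=90000000"
      · simp only [List.foldl_cons, if_neg h1, if_pos h2]
        rw [show ((PySem.Dict.mk [("sysclk_180mhz", b1), ("apb1_tim_90mhz", b2), ("all_pass", false)]).insert "apb1_tim_90mhz" true)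
              = PySem.Dict.mk [("sysclk_180mhz", b1), ("apb1_tim_90mhz", true), ("all_pass", false)] by
              simp [PySem.Dict.insert]]
        rw [ih]
        simp [h2]
      · simp only [List.foldl_cons, if_neg h1, if_neg h2]
        rw [ih]
        have e1 : (PySem.Str.strip h == "RCC.SYSCLKFreq_VALUE=180000000") = false :=
          beq_eq_false_iff_ne.mpr h1
        have e2 : (PySem.Str.strip h == "RCC.APB1TimFreq_Value=90000000") = false :=
          beq_eq_false_iff_ne.mpr h2
        simp [e1, e2]

-- B's per-line parse (proof-side helper): the (key, value) pair a line contributes, if any.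
def parseLine (raw : String) : Option (String × String) :=
  let line := PySem.Str.strip raw
  let i := PySem.Str.find line "="
  if i ≠ -1 then
    some (PySem.Str.slice line none (some i), PySem.Str.slice line (some (i + 1)) none)
  else none

-- B's fold is the pair-fold over the parsed lines.
theorem fold_eq_filterMap (ls : List String) (d : PySem.Dict String (List String)) :
    (ls.foldl (fun cfg raw =>
        let line := PySem.Str.strip raw
        let i := PySem.Str.find line "="
        if i ≠ -1 then
          cfg.modify (PySem.Str.slice line none (some i)) []
            (· ++ [PySem.Str.slice line (some (i + 1)) none])
        else cfg) d)
    = (ls.filterMap parseLine).foldl (fun d p => d.modify p.1 [] (· ++ [p.2])) d := by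
  induction ls generalizing d with
  | nil => rfl
  | cons h t ih =>
    simp only [List.foldl_cons, List.filterMap_cons]
    by_cases hi : PySem.Str.find (PySem.Str.strip h) "=" ≠ -1
    · rw [show parseLine h = some (PySem.Str.slice (PySem.Str.strip h) none (some (PySem.Str.find (PySem.Str.strip h) "=")),
             PySem.Str.slice (PySem.Str.strip h) (some (PySem.Str.find (PySem.Str.strip h) "=" + 1)) none) by
          simp only [parseLine]; rw [if_pos hi]]
      simp only [if_pos hi, List.foldl_cons]
      exact ih _
    · rw [show parseLine h = none by simp only [parseLine]; rw [if_neg hi]]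
      simp only [if_neg hi]
      exact ih _

-- The crux: a line parses to (K, V) exactly when its stripped form is the literal "K=V" (K without '=').
theorem parseLine_eq_some_iff (raw K V : String) (hK : ('=' : Char) ∉ K.toList) :
    parseLine raw = some (K, V) ↔ PySem.Str.strip raw = K ++ "=" ++ V := by
  unfold parseLine
  set s := PySem.Str.strip raw with hs
  set cs := s.toList with hcs
  have hfind : PySem.Str.find s "=" = PySem.Chars.find cs ['='] := PySem.Str.find_eq s "="
  have hRHS : (s = K ++ "=" ++ V) ↔ cs = K.toList ++ '=' :: V.toList := by
    rw [← String.toList_inj]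
    simp [String.toList_append, hcs]
  show (if PySem.Str.find s "=" ≠ -1 then
        some (PySem.Str.slice s none (some (PySem.Str.find s "=")),
              PySem.Str.slice s (some (PySem.Str.find s "=" + 1)) none)
      else none) = some (K, V) ↔ s = K ++ "=" ++ V
  by_cases h : PySem.Chars.find cs ['='] = -1
  · have hif0 : PySem.Str.find s "=" = -1 := by rw [hfind, h]
    rw [hif0]
    simp only [ne_eq, not_true_eq_false, if_false, reduceCtorEq, false_iff]
    intro heq
    have hinf : ['='] <:+: cs := by
      refine ⟨K.toList, V.toList, ?_⟩
      rw [hRHS.mp heq]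
      simp
    exact (PySem.Chars.find_eq_neg_one_iff cs ['=']).mp h hinf
  · have h0 : 0 ≤ PySem.Chars.find cs ['='] := by
      have := PySem.Chars.neg_one_le_find cs ['=']
      omega
    set i : ℕ := (PySem.Chars.find cs ['=']).toNat with hi
    have hfind' : PySem.Str.find s "=" = (i : ℤ) := by rw [hfind]; omega
    obtain ⟨hpre, hmin⟩ := PySem.Chars.find_spec h0
    obtain ⟨u, hu⟩ := hpre
    have hdrop : cs.drop i = '=' :: u := by rw [← hu]; rfl
    have hdrop1 : cs.drop (i + 1) = u := by
      rw [← List.drop_drop, hdrop]; simp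
    have hrecon : cs = cs.take i ++ '=' :: cs.drop (i + 1) := by
      conv_lhs => rw [← List.take_append_drop i cs]
      rw [hdrop, hdrop1]
    have hif : PySem.Str.find s "=" ≠ -1 := by rw [hfind]; exact h
    rw [if_pos hif]
    have hkey : (PySem.Str.slice s none (some (PySem.Str.find s "="))).toList = cs.take i := by
      rw [PySem.Str.toList_slice, PySem.Chars.slice_eq_listSlice, hfind',
        PySem.List.slice_to _ (by omega)]
      simp
      rw [hcs]
    have hval : (PySem.Str.slice s (some (PySem.Str.find s "=" + 1)) none).toList = cs.drop (i + 1) := by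
      rw [PySem.Str.toList_slice, PySem.Chars.slice_eq_listSlice, hfind',
        PySem.List.slice_from _ (by omega)]
      have ht : ((i : ℤ) + 1).toNat = i + 1 := by omega
      rw [ht]
    constructor
    · intro h'
      rw [Option.some.injEq, Prod.mk.injEq] at h'
      have h1 : cs.take i = K.toList := by rw [← hkey, h'.1]
      have h2 : cs.drop (i + 1) = V.toList := by rw [← hval, h'.2]
      rw [hRHS]
      rw [hrecon, h1, h2]
    · intro heq
      have hcs' : cs = K.toList ++ '=' :: V.toList := hRHS.mp heq
      have hdropn : cs.drop K.toList.length = '=' :: V.toList := by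
        rw [hcs']; exact List.drop_left
      have hle1 : i ≤ K.toList.length := by
        by_contra hlt
        rw [not_le] at hlt
        exact hmin K.toList.length hlt ⟨V.toList, by rw [hdropn, List.singleton_append]⟩
      have hle2 : K.toList.length ≤ i := by
        by_contra hlt
        rw [not_le] at hlt
        have hget : cs[i]? = some '=' := by rw [← List.head?_drop, hdrop]; rfl
        have hgk : K.toList[i]? = some '=' := by
          rw [← List.getElem?_append_left (l₂ := '=' :: V.toList) hlt, ← hcs', hget]
        exact hK (List.mem_of_getElem? hgk)
      have hni : i = K.toList.length := le_antisymm hle1 hle2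
      have h1 : cs.take i = K.toList := by rw [hni, hcs']; exact List.take_left
      have h2 : cs.drop (i + 1) = V.toList := by
        rw [hni, ← List.drop_drop, hdropn]; simp
      rw [Option.some.injEq, Prod.mk.injEq]
      exact ⟨String.toList_inj.mp (by rw [hkey, h1]), String.toList_inj.mp (by rw [hval, h2])⟩

-- B's lookup flag, characterised as the same "any stripped line equals the literal" test as A's.
theorem bflag (ls : List String) (K V T : String) (hK : ('=' : Char) ∉ K.toList)
    (hT : K ++ "=" ++ V = T) :
    (((ls.filterMap parseLine).foldl (fun d p => d.modify p.1 [] (· ++ [p.2]))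
        (PySem.Dict.empty : PySem.Dict String (List String))).getD K []).contains V
    = ls.any (fun l => PySem.Str.strip l == T) := by
  rw [PySem.Dict.getD_foldl_modify_append]
  have hempty : (PySem.Dict.empty : PySem.Dict String (List String)).getD K [] = [] := rfl
  rw [Bool.eq_iff_iff]
  simp only [hempty, List.nil_append, List.contains_eq_mem, decide_eq_true_eq, List.mem_map,
    List.mem_filter, List.mem_filterMap, List.any_eq_true, beq_iff_eq]
  constructor
  · rintro ⟨p, ⟨⟨raw, hraw, hp⟩, hk⟩, hv⟩
    obtain ⟨k, v⟩ := p
    subst hk hv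
    exact ⟨raw, hraw, hT ▸ (parseLine_eq_some_iff raw _ _ hK).mp hp⟩
  · rintro ⟨raw, hraw, hline⟩
    refine ⟨(K, V), ⟨⟨raw, hraw, ?_⟩, by simp⟩, rfl⟩
    exact (parseLine_eq_some_iff raw K V hK).mpr (hT ▸ hline)

-- ===== VERDICT (by name: the statement is the Claim_ definition above) =====
theorem check_system_clock_spec : Claim_equal_check_system_clock := by
  intro ioc_text _
  unfold Spec_check_system_clock check_system_clock check_system_clock_alt
  simp only []
  rw [show (PySem.Dict.ofList [("sysclk_180mhz", false), ("apb1_tim_90mhz", false), ("all_pass", false)] : PySem.Dict String Bool)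
        = PySem.Dict.mk [("sysclk_180mhz", false), ("apb1_tim_90mhz", false), ("all_pass", false)] by decide]
  rw [loop_flags, fold_eq_filterMap]
  rw [bflag _ "RCC.SYSCLKFreq_VALUE" "180000000" "RCC.SYSCLKFreq_VALUE=180000000" (by decide) rfl,
      bflag _ "RCC.APB1TimFreq_Value" "90000000" "RCC.APB1TimFreq_Value=90000000" (by decide) rfl]
  simp [PySem.Dict.insert, PySem.Dict.getD, PySem.Dict.get?]
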